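-- pv_equiv track=rewrite | github.com/KevinTimaran/Sisifo | Proyectos Uni/Segundo Semestre/Momento1/Semana 3(4  Ejercicios)/ConsultaMedica/ConsultaMedica.py | calcularCosto
-- ===== SOURCE A (Python) =====
-- def calcularCosto(numeroCita):
--
--
--     #Parte del cidigi cirve para Validar que el número de cita sea mayor o igual a 1
--     if numeroCita < 1:
--         raise ValueError("El número de cita debe ser 1 o mayor.")
--
--     # Se define la cita segun el numero de citas
--     if numeroCita <= 3:
--         costoActual = 200000
--     elif numeroCita <= 5:
--         costoActual = 150000
--     elif numeroCita <= 8: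
--         costoActual = 100000
--     else:
--         costoActual = 50000
--
--     # Calcular el total acumulado sumando el costo de todas las citas anteriores
--     totaAcumulado = 0
--     for cita in range(1, numeroCita + 1):
--         if cita <= 3:
--             totaAcumulado += 200000
--         elif cita <= 5:
--             totaAcumulado += 150000
--         elif cita <= 8:
--            totaAcumulado += 100000
--         else:
--             totaAcumulado += 50000
--
--     return costoActual, totaAcumulado
-- ===== SOURCE B (Python) =====
-- def calcularCosto(numeroCita):
--     if numeroCita < 1:
--         raise ValueError("El número de cita debe ser 1 o mayor.")
--     if numeroCita <= 3:
--         costoActual = 200000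
--         total = 200000 * numeroCita
--     elif numeroCita <= 5:
--         costoActual = 150000
--         total = 600000 + 150000 * (numeroCita - 3)
--     elif numeroCita <= 8:
--         costoActual = 100000
--         total = 900000 + 100000 * (numeroCita - 5)
--     else:
--         costoActual = 50000
--         total = 1200000 + 50000 * (numeroCita - 8)
--     return costoActual, total
-- ===== Notes on version B (the rewrite author's own statement) =====
-- stated objective: faster
-- what changed: Replaced the O(n) loop that re-adds each prior visit's tier cost with a closed-form piecewise sum over the four cost tiers.
import Mathlib
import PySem

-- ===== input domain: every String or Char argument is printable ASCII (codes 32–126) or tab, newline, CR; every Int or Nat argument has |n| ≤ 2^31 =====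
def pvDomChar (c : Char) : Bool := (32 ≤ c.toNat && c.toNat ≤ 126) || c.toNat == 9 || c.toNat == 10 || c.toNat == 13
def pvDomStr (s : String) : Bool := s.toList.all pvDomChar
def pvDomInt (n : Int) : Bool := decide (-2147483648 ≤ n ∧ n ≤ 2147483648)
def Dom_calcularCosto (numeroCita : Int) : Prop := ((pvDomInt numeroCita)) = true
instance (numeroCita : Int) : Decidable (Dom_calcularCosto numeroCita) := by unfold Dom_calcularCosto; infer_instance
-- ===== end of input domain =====

-- B replaces A's O(n) per-visit accumulation loop with a closed-form piecewise sum over the four cost tiers (objective: faster, asymptotic).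

-- ===== PORT A =====
-- A's loop body: add the tier cost of visit `cita` to the accumulator.
def pvStepA (acc : Int) (cita : Int) : Int :=
  if cita ≤ 3 then acc + 200000
  else if cita ≤ 5 then acc + 150000
  else if cita ≤ 8 then acc + 100000
  else acc + 50000

def calcularCosto (numeroCita : Int) : List Int :=
  let costoActual : Int :=
    if numeroCita ≤ 3 then 200000
    else if numeroCita ≤ 5 then 150000
    else if numeroCita ≤ 8 then 100000
    else 50000
  let totaAcumulado := (PySem.List.pyRange 1 (numeroCita + 1) 1).foldl pvStepA 0
  [costoActual, totaAcumulado]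

-- ===== PORT B =====
def calcularCosto_alt (numeroCita : Int) : List Int :=
  if numeroCita ≤ 3 then [200000, 200000 * numeroCita]
  else if numeroCita ≤ 5 then [150000, 600000 + 150000 * (numeroCita - 3)]
  else if numeroCita ≤ 8 then [100000, 900000 + 100000 * (numeroCita - 5)]
  else [50000, 1200000 + 50000 * (numeroCita - 8)]

-- ===== PRECONDITION & SPEC =====
-- A raises ValueError for numeroCita < 1 (and so does B); exactly those inputs are excluded.
def Pre_calcularCosto (numeroCita : Int) : Prop := 1 ≤ numeroCita
instance (numeroCita : Int) : Decidable (Pre_calcularCosto numeroCita) := by unfold Pre_calcularCosto; infer_instance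
def pvWitness_calcularCosto : Int := (4)

def Spec_calcularCosto (numeroCita : Int) (out : List Int) : Prop := out = calcularCosto_alt numeroCita
instance (numeroCita : Int) (out : List Int) : Decidable (Spec_calcularCosto numeroCita out) := by unfold Spec_calcularCosto; infer_instance

-- ===== CLAIM (what is proved, stated in full; the proofs are below) =====
def Claim_equal_calcularCosto : Prop := ∀ (numeroCita : Int), Dom_calcularCosto numeroCita → Pre_calcularCosto numeroCita → Spec_calcularCosto numeroCita (calcularCosto numeroCita)

-- ===== LEMMAS AND PROOFS =====

-- Closed form of the accumulated total (the second component of B's result).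
def pvClosedTotal (n : Int) : Int :=
  if n ≤ 3 then 200000 * n
  else if n ≤ 5 then 600000 + 150000 * (n - 3)
  else if n ≤ 8 then 900000 + 100000 * (n - 5)
  else 1200000 + 50000 * (n - 8)

theorem pvLoop_eq_closed (n : Int) (hn : 1 ≤ n) :
    (PySem.List.pyRange 1 (n + 1) 1).foldl pvStepA 0 = pvClosedTotal n := by
  induction n, hn using Int.le_induction with
  | base =>
      rw [PySem.List.pyRange_one_singleton]
      decide
  | succ n hn ih =>
      rw [PySem.List.pyRange_one_succ_right (by omega), List.foldl_append, ih]
      simp only [List.foldl, pvStepA, pvClosedTotal]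
      split_ifs <;> omega

-- ===== VERDICT (by name: the statement is the Claim_ definition above) =====
theorem calcularCosto_spec : Claim_equal_calcularCosto := by
  intro n _ hpre
  unfold Spec_calcularCosto calcularCosto calcularCosto_alt
  rw [pvLoop_eq_closed n hpre]
  unfold pvClosedTotal
  split_ifs <;> rfl
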